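-- pv_equiv track=rewrite | github.com/wtain/LeetCodePython | Algorithms/Advanced/DynamicProgramming/Arrays/FindAllGoodIndices.py | goodIndices
-- ===== SOURCE A (Python) =====
-- from typing import List
--
-- def goodIndices(nums: List[int], k: int) -> List[int]:
--     n = len(nums)
--     non_increasing, non_decreasing = [1] * n, [1] * n
--     for i in range(1, n):
--         if nums[i-1] >= nums[i]:
--             non_increasing[i] = non_increasing[i-1] + 1
--     for i in range(n-2, 0, -1):
--         if nums[i+1] >= nums[i]:
--             non_decreasing[i] = non_decreasing[i+1] + 1
--     return [i for i in range(1, n-1) if non_increasing[i-1] >= k and non_decreasing[i+1] >= k]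
-- ===== SOURCE B (Python) =====
-- from typing import List
--
--
-- def goodIndices(nums: List[int], k: int) -> List[int]:
--     # Brute force: for each interior index, scan its two length-k windows directly.
--     n = len(nums)
--     res = []
--     for i in range(1, n - 1):
--         if i - k < 0 or i + k > n - 1:
--             continue
--         ok = True
--         for j in range(i - k + 1, i):
--             if nums[j - 1] < nums[j]:
--                 ok = False
--                 break
--         if ok:
--             for j in range(i + 1, i + k):
--                 if nums[j + 1] < nums[j]:
--                     ok = False
--                     break
--         if ok:
--             res.append(i)
--     return res
-- ===== Notes on version B (the rewrite author's own statement) =====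
-- stated objective: alternative
-- what changed: Replaces the two prefix/suffix run-length DP arrays with direct brute-force scanning of each candidate index's two length-k windows (early-break local scans, no auxiliary arrays).
import Mathlib
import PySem

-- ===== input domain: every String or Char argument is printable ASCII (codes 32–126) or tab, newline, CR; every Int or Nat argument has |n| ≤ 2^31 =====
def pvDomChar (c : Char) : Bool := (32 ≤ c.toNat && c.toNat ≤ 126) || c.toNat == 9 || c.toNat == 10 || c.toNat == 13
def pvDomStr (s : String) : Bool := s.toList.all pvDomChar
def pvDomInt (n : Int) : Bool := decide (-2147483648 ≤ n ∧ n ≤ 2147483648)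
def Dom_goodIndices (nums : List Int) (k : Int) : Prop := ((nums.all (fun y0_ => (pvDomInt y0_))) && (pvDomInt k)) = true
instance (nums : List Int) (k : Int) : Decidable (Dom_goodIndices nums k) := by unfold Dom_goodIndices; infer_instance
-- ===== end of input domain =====

-- B replaces A's two run-length DP arrays with brute-force local scans of each
-- candidate's two length-k windows (objective: alternative, not faster).

-- ===== PORT A =====
-- body of A's first loop (builds non_increasing); reads/writes via pyGetD/pySetD
def stepNI (nums : List Int) (arr : List Int) (i : Int) : List Int :=
  if PySem.List.pyGetD nums (i - 1) 0 ≥ PySem.List.pyGetD nums i 0 then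
    PySem.List.pySetD arr i (PySem.List.pyGetD arr (i - 1) 0 + 1)
  else arr

-- body of A's second loop (builds non_decreasing)
def stepND (nums : List Int) (arr : List Int) (i : Int) : List Int :=
  if PySem.List.pyGetD nums (i + 1) 0 ≥ PySem.List.pyGetD nums i 0 then
    PySem.List.pySetD arr i (PySem.List.pyGetD arr (i + 1) 0 + 1)
  else arr

def niArr (nums : List Int) : List Int :=
  (PySem.List.pyRange 1 (nums.length : Int) 1).foldl (stepNI nums) (List.replicate nums.length 1)

def ndArr (nums : List Int) : List Int :=
  (PySem.List.pyRange ((nums.length : Int) - 2) 0 (-1)).foldl (stepND nums) (List.replicate nums.length 1)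

def goodIndices (nums : List Int) (k : Int) : List Int :=
  (PySem.List.pyRange 1 ((nums.length : Int) - 1) 1).foldl
    (fun acc i =>
      if PySem.List.pyGetD (niArr nums) (i - 1) 0 ≥ k ∧ PySem.List.pyGetD (ndArr nums) (i + 1) 0 ≥ k then
        acc ++ [i]
      else acc) []

-- ===== PORT B =====
-- B's before-window scan; the Python early-break flag loop ports as `.all` over the same range
def winBefore (nums : List Int) (i k : Int) : Bool :=
  (PySem.List.pyRange (i - k + 1) i 1).all
    (fun j => !(PySem.List.pyGetD nums (j - 1) 0 < PySem.List.pyGetD nums j 0))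

-- B's after-window scan, same shape
def winAfter (nums : List Int) (i k : Int) : Bool :=
  (PySem.List.pyRange (i + 1) (i + k) 1).all
    (fun j => !(PySem.List.pyGetD nums (j + 1) 0 < PySem.List.pyGetD nums j 0))

def goodIndices_alt (nums : List Int) (k : Int) : List Int :=
  (PySem.List.pyRange 1 ((nums.length : Int) - 1) 1).foldl
    (fun acc i =>
      if i - k < 0 ∨ i + k > (nums.length : Int) - 1 then acc   -- Python's `continue`
      else if winBefore nums i k && winAfter nums i k then acc ++ [i]
      else acc) []

-- ===== PRECONDITION & SPEC =====
def Spec_goodIndices (nums : List Int) (k : Int) (out : List Int) : Prop := out = goodIndices_alt nums k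
instance (nums : List Int) (k : Int) (out : List Int) : Decidable (Spec_goodIndices nums k out) := by unfold Spec_goodIndices; infer_instance

-- ===== CLAIM (what is proved, stated in full; the proofs are below) =====
def Claim_equal_goodIndices : Prop := ∀ (nums : List Int) (k : Int), Dom_goodIndices nums k → Spec_goodIndices nums k (goodIndices nums k)

-- ===== LEMMAS AND PROOFS =====

def gN (nums : List Int) (m : Nat) : Int := nums.getD m 0

def R (nums : List Int) : Nat → Int
  | 0 => 1
  | m + 1 => if gN nums m ≥ gN nums (m + 1) then R nums m + 1 else 1

def S (nums : List Int) (m : Nat) : Int :=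
  if _h : m + 1 < nums.length then
    (if gN nums m ≤ gN nums (m + 1) then S nums (m + 1) + 1 else 1)
  else 1
termination_by nums.length - m



-- pyGetD at a nonneg Int index is getD at toNat
lemma pyGetD_toNat (xs : List Int) (z : Int) (hz : 0 ≤ z) :
    PySem.List.pyGetD xs z 0 = xs.getD z.toNat 0 := by
  rw [show z = ((z.toNat : Nat) : Int) from by omega, PySem.List.pyGetD_natCast]
  simp only [List.getD_eq_getElem?_getD]
  rw [show ((z.toNat : Nat) : Int).toNat = z.toNat from by omega]

lemma R_ge_iff (nums : List Int) :
    ∀ (m : Nat) (k : Int), R nums m ≥ k ↔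
      (k ≤ (m : Int) + 1 ∧
        ∀ j : Nat, (m : Int) + 1 - k < (j : Int) → j ≤ m → 1 ≤ j → gN nums (j - 1) ≥ gN nums j) := by
  intro m
  induction m with
  | zero =>
    intro k
    simp only [R, ge_iff_le, Nat.cast_zero]
    constructor
    · intro h
      exact ⟨by omega, fun j _ h2 h3 => by omega⟩
    · intro ⟨h, _⟩; omega
  | succ m ih =>
    intro k
    by_cases hc : gN nums m ≥ gN nums (m + 1)
    · rw [show R nums (m + 1) = R nums m + 1 from by simp [R, hc]]
      constructor
      · intro h
        obtain ⟨h1, hw⟩ := (ih (k - 1)).mp (by omega)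
        refine ⟨by push_cast; omega, ?_⟩
        intro j hj1 hj2 hj3
        rcases Nat.lt_or_ge j (m + 1) with hj | hj
        · exact hw j (by push_cast at hj1 ⊢; omega) (by omega) hj3
        · have : j = m + 1 := by omega
          subst this
          simpa using hc
      · intro ⟨h1, hw⟩
        have : R nums m ≥ k - 1 := by
          apply (ih (k - 1)).mpr
          refine ⟨by push_cast at h1 ⊢; omega, ?_⟩
          intro j hj1 hj2 hj3
          exact hw j (by push_cast at hj1 ⊢; omega) (by omega) hj3
        omega
    · rw [show R nums (m + 1) = 1 from by simp [R, hc]]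
      constructor
      · intro h
        refine ⟨by push_cast; omega, ?_⟩
        intro j hj1 hj2 hj3
        exfalso; push_cast at hj1; omega
      · intro ⟨h1, hw⟩
        by_contra hk
        have : gN nums m ≥ gN nums (m + 1) := by
          have := hw (m + 1) (by push_cast; omega) (by omega) (by omega)
          simpa using this
        exact hc this

lemma S_ge_iff (nums : List Int) :
    ∀ (m : Nat) (k : Int), m < nums.length → (S nums m ≥ k ↔
      ((m : Int) + k ≤ (nums.length : Int) ∧
        ∀ j : Nat, m ≤ j → (j : Int) < (m : Int) + k - 1 → gN nums j ≤ gN nums (j + 1))) := by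
  intro m
  induction' hI : nums.length - m using Nat.strong_induction_on with d ih generalizing m
  intro k hm
  by_cases hlt : m + 1 < nums.length
  · rw [show S nums m = if gN nums m ≤ gN nums (m + 1) then S nums (m + 1) + 1 else 1 from by
      rw [S]; simp [hlt]]
    have ihm := ih (nums.length - (m + 1)) (by omega) (m + 1) rfl
    by_cases hc : gN nums m ≤ gN nums (m + 1)
    · rw [if_pos hc]
      constructor
      · intro h
        obtain ⟨h1, hw⟩ := (ihm (k - 1) hlt).mp (by omega)
        refine ⟨by push_cast at h1 ⊢; omega, ?_⟩
        intro j hj1 hj2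
        rcases Nat.lt_or_ge j (m + 1) with hj | hj
        · have : j = m := by omega
          subst this; exact hc
        · exact hw j hj (by push_cast at hj2 ⊢; omega)
      · intro ⟨h1, hw⟩
        have : S nums (m + 1) ≥ k - 1 := by
          apply (ihm (k - 1) hlt).mpr
          refine ⟨by push_cast at h1 ⊢; omega, ?_⟩
          intro j hj1 hj2
          exact hw j (by omega) (by push_cast at hj2 ⊢; omega)
        omega
    · rw [if_neg hc]
      constructor
      · intro h
        refine ⟨by omega, ?_⟩
        intro j hj1 hj2
        exfalso; omega
      · intro ⟨h1, hw⟩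
        by_contra hk
        exact hc (hw m (by omega) (by omega))
  · rw [show S nums m = 1 from by rw [S]; simp [hlt]]
    constructor
    · intro h
      refine ⟨by omega, ?_⟩
      intro j hj1 hj2
      exfalso; omega
    · intro ⟨h1, hw⟩
      omega

lemma ni_char (nums : List Int) :
    ∀ t : Nat, 1 ≤ t → t ≤ nums.length →
      ((PySem.List.pyRange 1 (t : Int) 1).foldl (stepNI nums) (List.replicate nums.length 1)).length = nums.length ∧
      (∀ m : Nat, m < nums.length →
        ((PySem.List.pyRange 1 (t : Int) 1).foldl (stepNI nums) (List.replicate nums.length 1)).getD m 0 =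
          if m < t then R nums m else 1) := by
  intro t
  induction t with
  | zero => omega
  | succ t ih =>
    intro _ htn
    rcases Nat.eq_or_lt_of_le (show 1 ≤ t + 1 from by omega) with h1 | h1
    · -- t + 1 = 1 : empty range
      have : ((t : Nat) : Int) + 1 = 1 := by omega
      rw [show ((t + 1 : Nat) : Int) = 1 from by push_cast; omega,
          PySem.List.pyRange_one_eq_nil (by omega)]
      refine ⟨by simp, ?_⟩
      intro m hm
      simp only [List.foldl_nil]
      have hrep : (List.replicate nums.length (1:Int)).getD m 0 = 1 := by
        rw [List.getD_eq_getElem?_getD, List.getElem?_replicate, if_pos hm]; rfl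
      rw [hrep]
      have ht0 : t = 0 := by omega
      subst ht0
      split_ifs with h
      · have : m = 0 := by omega
        subst this; simp [R]
      · rfl
    · -- 1 ≤ t
      have ht1 : 1 ≤ t := by omega
      have htn' : t ≤ nums.length := by omega
      obtain ⟨ihl, ihv⟩ := ih ht1 htn'
      rw [show ((t + 1 : Nat) : Int) = (t : Int) + 1 from by push_cast; ring,
          PySem.List.pyRange_one_succ_right (by omega), List.foldl_append]
      set arr := (PySem.List.pyRange 1 (t : Int) 1).foldl (stepNI nums) (List.replicate nums.length 1) with harr
      simp only [List.foldl_cons, List.foldl_nil]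
      have hR : R nums t = if nums.getD (t - 1) 0 ≥ nums.getD t 0 then R nums (t - 1) + 1 else 1 := by
        rw [show t = (t - 1) + 1 from by omega]
        simp only [R, gN]
        rw [show t - 1 + 1 = t from by omega]
        rfl
      unfold stepNI
      rw [pyGetD_toNat nums ((t : Int) - 1) (by omega), pyGetD_toNat nums (t : Int) (by omega)]
      rw [show ((t : Int) - 1).toNat = t - 1 from by omega, show ((t : Int)).toNat = t from by omega]
      by_cases hc : nums.getD (t - 1) 0 ≥ nums.getD t 0
      · rw [if_pos hc]
        rw [pyGetD_toNat arr ((t : Int) - 1) (by omega),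
            show ((t : Int) - 1).toNat = t - 1 from by omega]
        rw [PySem.List.pySetD_natCast]
        constructor
        · simp [ihl]
        · intro m hm
          rw [List.getD_eq_getElem?_getD, List.getElem?_set]
          by_cases hmt : t = m
          · rw [if_pos hmt, if_pos (by rw [ihl]; omega)]
            simp only [Option.getD_some]
            rw [← hmt, if_pos (by omega)]
            have hv : arr.getD (t - 1) 0 = R nums (t - 1) := by
              rw [ihv (t - 1) (by omega), if_pos (by omega)]
            rw [hv, hR, if_pos hc]
          · rw [if_neg hmt, ← List.getD_eq_getElem?_getD, ihv m hm]
            split_ifs with h1 h2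
            · rfl
            · exact absurd (by omega : m < t + 1) h2
            · exact absurd (by omega : t = m) hmt
            · rfl
      · rw [if_neg hc]
        refine ⟨ihl, ?_⟩
        intro m hm
        rw [ihv m hm]
        by_cases hmt : m = t
        · subst hmt
          rw [if_neg (by omega), if_pos (by omega), hR, if_neg hc]
        · have : m < t + 1 ↔ m < t := by omega
          simp [this]

lemma stepND_getD (nums arr : List Int) (m : Nat) (hlen : arr.length = nums.length)
    (hm : m + 3 ≤ nums.length)
    (hv : ∀ j : Nat, j < nums.length → arr.getD j 0 = if m + 1 < j ∧ j + 2 ≤ nums.length then S nums j else 1) :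
    (stepND nums arr ((m + 1 : Nat) : Int)).length = nums.length ∧
    (∀ j : Nat, j < nums.length →
      (stepND nums arr ((m + 1 : Nat) : Int)).getD j 0 = if m < j ∧ j + 2 ≤ nums.length then S nums j else 1) := by
  have h2 : arr.getD (m + 2) 0 = S nums (m + 2) := by
    rw [hv (m + 2) (by omega)]
    by_cases h4 : m + 4 ≤ nums.length
    · rw [if_pos ⟨by omega, h4⟩]
    · rw [if_neg (by omega), S]
      rw [dif_neg (by omega)]
  have hSm : S nums (m + 1) =
      if gN nums (m + 1) ≤ gN nums (m + 2) then S nums (m + 2) + 1 else 1 := by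
    rw [S, dif_pos (by omega : m + 1 + 1 < nums.length)]
  unfold stepND
  rw [show ((m + 1 : Nat) : Int) + 1 = ((m + 2 : Nat) : Int) from by push_cast; ring]
  rw [pyGetD_toNat nums _ (by positivity), pyGetD_toNat nums _ (by positivity)]
  rw [show ((m + 2 : Nat) : Int).toNat = m + 2 from by omega,
      show ((m + 1 : Nat) : Int).toNat = m + 1 from by omega]
  by_cases hc : nums.getD (m + 2) 0 ≥ nums.getD (m + 1) 0
  · rw [if_pos hc]
    rw [pyGetD_toNat arr _ (by positivity), show ((m + 2 : Nat) : Int).toNat = m + 2 from by omega]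
    rw [PySem.List.pySetD_natCast]
    refine ⟨by simp [hlen], ?_⟩
    intro j hj
    rw [List.getD_eq_getElem?_getD, List.getElem?_set]
    by_cases hjm : m + 1 = j
    · rw [if_pos hjm, if_pos (by rw [hlen]; omega)]
      simp only [Option.getD_some]
      rw [← hjm, if_pos (by omega), hSm, if_pos (by simpa [gN] using hc), h2]
    · rw [if_neg hjm, ← List.getD_eq_getElem?_getD, hv j hj]
      split_ifs with ha hb
      · rfl
      · exact absurd ⟨by omega, ha.2⟩ hb
      · exact absurd (by omega : m + 1 = j) hjm
      · rfl
  · rw [if_neg hc]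
    refine ⟨hlen, ?_⟩
    intro j hj
    rw [hv j hj]
    by_cases hjm : j = m + 1
    · subst hjm
      rw [if_neg (by omega), if_pos (by omega), hSm, if_neg (by simpa [gN] using hc)]
    · split_ifs with ha hb
      · rfl
      · exact absurd ⟨by omega, ha.2⟩ hb
      · exact absurd (by omega : j = m + 1) hjm
      · rfl

lemma nd_char (nums : List Int) :
    ∀ (m : Nat) (arr : List Int), m + 2 ≤ nums.length → arr.length = nums.length →
      (∀ j : Nat, j < nums.length → arr.getD j 0 = if m < j ∧ j + 2 ≤ nums.length then S nums j else 1) →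
      ((PySem.List.pyRange (m : Int) 0 (-1)).foldl (stepND nums) arr).length = nums.length ∧
      (∀ j : Nat, j < nums.length →
        ((PySem.List.pyRange (m : Int) 0 (-1)).foldl (stepND nums) arr).getD j 0 =
          if 1 ≤ j ∧ j + 2 ≤ nums.length then S nums j else 1) := by
  intro m
  induction m with
  | zero =>
    intro arr _ hlen hv
    rw [PySem.List.pyRange_neg_one_eq_nil (by omega)]
    refine ⟨hlen, ?_⟩
    intro j hj
    rw [List.foldl_nil, hv j hj]
    split_ifs with ha hb hc
    · rfl
    · exact absurd ⟨by omega, ha.2⟩ hb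
    · exact absurd ⟨by omega, hc.2⟩ ha
    · rfl
  | succ m ih =>
    intro arr hm hlen hv
    rw [PySem.List.pyRange_neg_one_cons (by positivity), List.foldl_cons]
    obtain ⟨hl', hv'⟩ := stepND_getD nums arr m hlen (by omega) (by simpa using hv)
    rw [show ((m + 1 : Nat) : Int) - 1 = (m : Int) from by push_cast; ring]
    exact ih _ (by omega) hl' hv'





lemma niArr_getD (nums : List Int) (i : Int) (h1 : 1 ≤ i) (h2 : i < (nums.length : Int) - 1) :
    PySem.List.pyGetD (niArr nums) (i - 1) 0 = R nums (i - 1).toNat := by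
  obtain ⟨hl, hv⟩ := ni_char nums nums.length (by omega) le_rfl
  unfold niArr
  rw [pyGetD_toNat _ _ (by omega), hv _ (by omega), if_pos (by omega)]

lemma ndArr_getD (nums : List Int) (i : Int) (h1 : 1 ≤ i) (h2 : i < (nums.length : Int) - 1) :
    PySem.List.pyGetD (ndArr nums) (i + 1) 0 = S nums (i + 1).toNat := by
  obtain ⟨hl, hv⟩ := nd_char nums (nums.length - 2) (List.replicate nums.length 1)
    (by omega) (by simp) (fun j hj => by
      rw [List.getD_eq_getElem?_getD, List.getElem?_replicate, if_pos hj, if_neg (by omega)]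
      rfl)
  unfold ndArr
  rw [show ((nums.length : Int) - 2) = ((nums.length - 2 : Nat) : Int) from by omega]
  rw [pyGetD_toNat _ _ (by omega), hv _ (by omega)]
  by_cases h4 : (i + 1).toNat + 2 ≤ nums.length
  · rw [if_pos ⟨by omega, h4⟩]
  · rw [if_neg (by omega), S, dif_neg (by omega)]

lemma winBefore_iff (nums : List Int) (i k : Int) :
    winBefore nums i k = true ↔
      (∀ j : Int, i - k + 1 ≤ j → j < i → PySem.List.pyGetD nums (j - 1) 0 ≥ PySem.List.pyGetD nums j 0) := by
  unfold winBefore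
  rw [List.all_eq_true]
  constructor
  · intro h j hj1 hj2
    have := h j (by rw [PySem.List.mem_pyRange_one]; omega)
    simpa using this
  · intro h j hj
    rw [PySem.List.mem_pyRange_one] at hj
    simpa using h j (by omega) (by omega)

lemma winAfter_iff (nums : List Int) (i k : Int) :
    winAfter nums i k = true ↔
      (∀ j : Int, i + 1 ≤ j → j < i + k → PySem.List.pyGetD nums (j + 1) 0 ≥ PySem.List.pyGetD nums j 0) := by
  unfold winAfter
  rw [List.all_eq_true]
  constructor
  · intro h j hj1 hj2
    have := h j (by rw [PySem.List.mem_pyRange_one]; omega)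
    simpa using this
  · intro h j hj
    rw [PySem.List.mem_pyRange_one] at hj
    simpa using h j (by omega) (by omega)

lemma cond_iff (nums : List Int) (k i : Int) (hi1 : 1 ≤ i) (hi2 : i < (nums.length : Int) - 1) :
    (PySem.List.pyGetD (niArr nums) (i - 1) 0 ≥ k ∧ PySem.List.pyGetD (ndArr nums) (i + 1) 0 ≥ k) ↔
    (¬(i - k < 0 ∨ i + k > (nums.length : Int) - 1) ∧ (winBefore nums i k && winAfter nums i k) = true) := by
  rw [niArr_getD nums i hi1 hi2, ndArr_getD nums i hi1 hi2,
      R_ge_iff nums (i - 1).toNat k, S_ge_iff nums (i + 1).toNat k (by omega),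
      Bool.and_eq_true, winBefore_iff, winAfter_iff]
  rw [show (((i - 1).toNat : Int)) = i - 1 from by omega,
      show (((i + 1).toNat : Int)) = i + 1 from by omega]
  constructor
  · intro ⟨⟨hk1, hw1⟩, ⟨hk2, hw2⟩⟩
    refine ⟨by omega, ?_, ?_⟩
    · intro j hj1 hj2
      have h0j : 1 ≤ j := by omega
      have := hw1 j.toNat (by omega) (by omega) (by omega)
      rw [pyGetD_toNat _ _ (by omega), pyGetD_toNat _ _ (by omega)]
      rw [show (j - 1).toNat = j.toNat - 1 from by omega, show j.toNat = j.toNat from rfl]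
      exact this
    · intro j hj1 hj2
      have := hw2 j.toNat (by omega) (by omega)
      rw [pyGetD_toNat _ _ (by omega), pyGetD_toNat _ _ (by omega)]
      rw [show (j + 1).toNat = j.toNat + 1 from by omega]
      exact this
  · intro ⟨hb, hw1, hw2⟩
    refine ⟨⟨by omega, ?_⟩, by omega, ?_⟩
    · intro j hj1 hj2 hj3
      have := hw1 (j : Int) (by omega) (by omega)
      rw [pyGetD_toNat _ _ (by omega), pyGetD_toNat _ _ (by omega)] at this
      rw [show ((j : Int) - 1).toNat = j - 1 from by omega] at this
      simpa using this
    · intro j hj1 hj2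
      have := hw2 (j : Int) (by omega) (by omega)
      rw [pyGetD_toNat _ _ (by omega), pyGetD_toNat _ _ (by omega)] at this
      rw [show ((j : Int) + 1).toNat = j + 1 from by omega] at this
      simpa using this

theorem goodIndices_eq (nums : List Int) (k : Int) :
    (PySem.List.pyRange 1 ((nums.length : Int) - 1) 1).foldl
      (fun acc i =>
        if PySem.List.pyGetD (niArr nums) (i - 1) 0 ≥ k ∧ PySem.List.pyGetD (ndArr nums) (i + 1) 0 ≥ k then
          acc ++ [i]
        else acc) [] =
    (PySem.List.pyRange 1 ((nums.length : Int) - 1) 1).foldl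
      (fun acc i =>
        if i - k < 0 ∨ i + k > (nums.length : Int) - 1 then acc
        else if winBefore nums i k && winAfter nums i k then acc ++ [i]
        else acc) [] := by
  have hB :
      (PySem.List.pyRange 1 ((nums.length : Int) - 1) 1).foldl
        (fun acc i =>
          if i - k < 0 ∨ i + k > (nums.length : Int) - 1 then acc
          else if winBefore nums i k && winAfter nums i k then acc ++ [i]
          else acc) ([] : List Int) =
      (PySem.List.pyRange 1 ((nums.length : Int) - 1) 1).foldl
        (fun acc i =>
          if (¬(i - k < 0 ∨ i + k > (nums.length : Int) - 1) ∧ (winBefore nums i k && winAfter nums i k) = true) then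
            acc ++ [i]
          else acc) [] := by
    apply PySem.List.foldl_congr_mem
    intro acc x _
    split_ifs <;> tauto
  rw [hB, PySem.List.foldl_append_ite_eq_filter, PySem.List.foldl_append_ite_eq_filter]
  apply List.filter_congr
  intro i hi
  rw [PySem.List.mem_pyRange_one] at hi
  exact decide_eq_decide.mpr (cond_iff nums k i (by omega) (by omega))

-- ===== VERDICT (by name: the statement is the Claim_ definition above) =====
theorem goodIndices_spec : Claim_equal_goodIndices := by
  intro nums k _
  unfold Spec_goodIndices goodIndices goodIndices_alt
  exact goodIndices_eq nums k
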